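-- pv_equiv track=rewrite | github.com/MridulGangwar/Leetcode-Solutions | Python/Easy/1196. How Many Apples Can You Put into the Basket.py | maxNumberOfApples
-- ===== SOURCE A (Python) =====
-- def maxNumberOfApples(arr):
--     """
--     :type arr: List[int]
--     :rtype: int
--     """
--     arr.sort()
--     result=0
--     index=0
--
--     while result<5000 and index<len(arr):
--         result+=arr[index]
--         index+=1
--
--     if result>5000:
--         return index-1
--     else: return index
-- ===== SOURCE B (Python) =====
-- def maxNumberOfApples(arr):
--     counts = {}
--     for w in arr:
--         counts[w] = counts.get(w, 0) + 1
--     total = 0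
--     taken = 0
--     for w in sorted(counts):
--         if total >= 5000:
--             break
--         c = counts[w]
--         if w <= 0:
--             total += c * w
--             taken += c
--         else:
--             q = (5000 - total + w - 1) // w
--             t = c if c < q else q
--             total += t * w
--             taken += t
--     return taken - 1 if total > 5000 else taken
-- ===== Notes on version B (the rewrite author's own statement) =====
-- stated objective: alternative
-- what changed: B builds a dict counter of weights and, per distinct weight in sorted order, takes a whole block of copies with one ceiling-division computation, instead of A's in-place sort followed by an element-by-element accumulation loop.
import Mathlib
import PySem

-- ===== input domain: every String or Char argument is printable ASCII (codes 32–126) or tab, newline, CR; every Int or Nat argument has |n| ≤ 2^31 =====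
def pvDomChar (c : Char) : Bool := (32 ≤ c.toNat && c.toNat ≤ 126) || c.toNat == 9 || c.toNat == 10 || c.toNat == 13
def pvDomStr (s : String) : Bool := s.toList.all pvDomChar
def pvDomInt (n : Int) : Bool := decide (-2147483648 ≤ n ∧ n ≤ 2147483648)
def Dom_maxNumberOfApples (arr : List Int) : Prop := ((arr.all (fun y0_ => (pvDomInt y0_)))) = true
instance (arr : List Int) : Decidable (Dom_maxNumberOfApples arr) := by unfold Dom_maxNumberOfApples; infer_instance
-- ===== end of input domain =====

-- B replaces A's sort-and-scan with a dict counter plus per-distinct-weight block arithmetic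
-- (alternative decomposition, same results). Note: Python A sorts `arr` in place; the
-- equivalence proved here is about the RETURN value only.

-- ===== PORT A =====
-- while result<5000 and index<len(arr): result+=arr[index]; index+=1
-- (recursion over the suffix of the sorted list carries (result, index))
def pvALoop : List Int → Int → Int → Int × Int
  | [], result, index => (result, index)
  | x :: xs, result, index =>
    if result < 5000 then pvALoop xs (result + x) (index + 1) else (result, index)

def maxNumberOfApples (arr : List Int) : Int :=
  let s := PySem.List.sorted arr (fun x => x) false
  let p := pvALoop s 0 0
  if p.1 > 5000 then p.2 - 1 else p.2

-- ===== PORT B =====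
-- for w in sorted(counts): block-take min(c, ceil((5000-total)/w)) copies of w
def pvBLoop (counts : PySem.Dict Int Int) : List Int → Int → Int → Int × Int
  | [], total, taken => (total, taken)
  | w :: ws, total, taken =>
    if total ≥ 5000 then (total, taken)
    else
      let c := counts.getD w 0
      if w ≤ 0 then pvBLoop counts ws (total + c * w) (taken + c)
      else
        let q := PySem.Int.floordiv (5000 - total + w - 1) w
        let t := if c < q then c else q
        pvBLoop counts ws (total + t * w) (taken + t)

def maxNumberOfApples_alt (arr : List Int) : Int :=
  let counts := arr.foldl (fun d x => d.insert x (d.getD x 0 + 1)) PySem.Dict.empty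
  let ws := PySem.List.sorted counts.keys (fun x => x) false
  let p := pvBLoop counts ws 0 0
  if p.1 > 5000 then p.2 - 1 else p.2

-- ===== PRECONDITION & SPEC =====
def Spec_maxNumberOfApples (arr : List Int) (out : Int) : Prop := out = maxNumberOfApples_alt arr
instance (arr : List Int) (out : Int) : Decidable (Spec_maxNumberOfApples arr out) := by unfold Spec_maxNumberOfApples; infer_instance

-- ===== CLAIM (what is proved, stated in full; the proofs are below) =====
def Claim_equal_maxNumberOfApples : Prop := ∀ (arr : List Int), Dom_maxNumberOfApples arr → Spec_maxNumberOfApples arr (maxNumberOfApples arr)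

-- ===== LEMMAS AND PROOFS =====

theorem pvALoop_ge (l : List Int) (r i : Int) (h : 5000 ≤ r) : pvALoop l r i = (r, i) := by
  cases l with
  | nil => rfl
  | cons x xs => simp [pvALoop, not_lt.mpr h]

theorem pvBLoop_ge (d : PySem.Dict Int Int) (l : List Int) (r i : Int) (h : 5000 ≤ r) :
    pvBLoop d l r i = (r, i) := by
  cases l with
  | nil => rfl
  | cons x xs => simp [pvBLoop, h]

-- A's loop consumes a whole block of c copies of w when every partial sum stays below 5000
theorem pvALoop_replicate (c : Nat) (w : Int) (rest : List Int) (r i : Int)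
    (h : ∀ j : Nat, j < c → r + j * w < 5000) :
    pvALoop (List.replicate c w ++ rest) r i = pvALoop rest (r + c * w) (i + c) := by
  induction c generalizing r i with
  | zero => simp
  | succ n ih =>
    have h0 : r < 5000 := by have := h 0 (Nat.succ_pos n); simpa using this
    rw [List.replicate_succ, List.cons_append]
    rw [pvALoop]
    simp only [if_pos h0]
    rw [ih (r + w) (i + 1) (fun j hj => by
      have := h (j + 1) (Nat.succ_lt_succ hj)
      push_cast at this ⊢
      linarith)]
    congr 1 <;> push_cast <;> ring

theorem main_loop_eq (d : PySem.Dict Int Int) (arr : List Int) (ks : List Int) (r i : Int)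
    (hc : ∀ w ∈ ks, d.getD w 0 = (arr.count w : Int)) :
    pvALoop (ks.flatMap (fun w => List.replicate (arr.count w) w)) r i = pvBLoop d ks r i := by
  induction ks generalizing r i with
  | nil => rfl
  | cons w ks ih =>
    by_cases hr : 5000 ≤ r
    · rw [pvBLoop_ge _ _ _ _ hr, pvALoop_ge _ _ _ hr]
    · push_neg at hr
      rw [List.flatMap_cons]
      have hcw : d.getD w 0 = (arr.count w : Int) := hc w (List.mem_cons_self)
      set c : Nat := arr.count w with hcdef
      rw [pvBLoop]
      simp only [if_neg (not_le.mpr hr), hcw]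
      by_cases hw : w ≤ 0
      · -- nonpositive weight: all partial sums stay < 5000
        rw [if_pos hw]
        rw [pvALoop_replicate c w _ r i (fun j hj => by
          have hjw : (j : Int) * w ≤ 0 := mul_nonpos_of_nonneg_of_nonpos (by positivity) hw
          linarith)]
        exact ih (r + c * w) (i + c) (fun x hx => hc x (List.mem_cons_of_mem _ hx))
      · push_neg at hw
        rw [if_neg (not_le.mpr hw)]
        -- q = ceil((5000 - r)/w)
        set N : Int := 5000 - r with hN
        have hN1 : 1 ≤ N := by omega
        set q : Int := PySem.Int.floordiv (N + w - 1) w with hq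
        have hqdiv : q = (N + w - 1) / w := by
          rw [hq, PySem.Int.floordiv, Int.fdiv_eq_ediv_of_nonneg]; omega
        have hmod := Int.emod_nonneg (N + w - 1) (ne_of_gt hw)
        have hmod2 := Int.emod_lt_of_pos (N + w - 1) hw
        have hdm := Int.ediv_add_emod (N + w - 1) w
        have hqw : N ≤ q * w := by
          rw [hqdiv]; nlinarith [Int.ediv_add_emod (N + w - 1) w]
        have hlt : ∀ j : Int, 0 ≤ j → j < q → j * w < N := by
          intro j hj0 hjq
          have : (j + 1) * w ≤ q * w := mul_le_mul_of_nonneg_right (by omega) (le_of_lt hw)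
          have hq1 : q * w ≤ N + w - 1 := by
            rw [hqdiv]; nlinarith [Int.ediv_add_emod (N + w - 1) w]
          nlinarith
        have hq1 : 1 ≤ q := by nlinarith
        by_cases hcq : (c : Int) < q
        · -- whole block consumed, stay below 5000
          rw [if_pos hcq]
          rw [pvALoop_replicate c w _ r i (fun j hj => by
            have := hlt j (by positivity) (by exact_mod_cast lt_trans (by exact_mod_cast hj) hcq)
            omega)]
          exact ih (r + c * w) (i + c) (fun x hx => hc x (List.mem_cons_of_mem _ hx))
        · -- loop stops inside this block after q copies
          push_neg at hcq
          rw [if_neg (not_lt.mpr hcq)]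
          have hqnat : (q.toNat : Int) = q := Int.toNat_of_nonneg (by omega)
          have hqc : q.toNat ≤ c := by omega
          have hsplit : List.replicate c w = List.replicate q.toNat w ++ List.replicate (c - q.toNat) w := by
            rw [← List.replicate_add]; congr 1; omega
          rw [hsplit, List.append_assoc]
          rw [pvALoop_replicate q.toNat w _ r i (fun j hj => by
            have := hlt j (by positivity) (by omega)
            omega)]
          rw [pvALoop_ge _ _ _ (by rw [hqnat]; omega)]
          rw [pvBLoop_ge _ _ _ _ (by omega)]
          rw [hqnat]

-- counting the grouped list
theorem count_flatMap_replicate (arr ks : List Int) (hnd : ks.Nodup) (v : Int) :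
    (ks.flatMap (fun w => List.replicate (arr.count w) w)).count v
      = if v ∈ ks then arr.count v else 0 := by
  induction ks with
  | nil => simp
  | cons w ks ih =>
    rw [List.flatMap_cons, List.count_append, ih hnd.of_cons]
    by_cases hv : v = w
    · subst hv
      have hnk : v ∉ ks := (List.nodup_cons.mp hnd).1
      simp [List.count_replicate, hnk]
    · simp only [List.count_replicate, List.mem_cons, hv, false_or]
      have hwv : (w == v) = false := by
        simp only [beq_eq_false_iff_ne, ne_eq]
        exact fun h => hv h.symm
      simp [hwv]

theorem pairwise_flatMap_replicate (arr : List Int) (ks : List Int)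
    (hpw : ks.Pairwise (· < ·)) :
    (ks.flatMap (fun w => List.replicate (arr.count w) w)).Pairwise (· ≤ ·) := by
  induction ks with
  | nil => simp
  | cons w ks ih =>
    rw [List.flatMap_cons, List.pairwise_append]
    refine ⟨List.pairwise_replicate.mpr (Or.inr le_rfl), ih hpw.of_cons, ?_⟩
    intro a ha b hb
    rcases List.eq_of_mem_replicate ha with rfl
    rcases List.mem_flatMap.mp hb with ⟨w', hw', hb'⟩
    rcases List.eq_of_mem_replicate hb' with rfl
    exact le_of_lt (List.rel_of_pairwise_cons hpw hw')

theorem grouped_eq_sorted (arr : List Int) :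
    PySem.List.sorted arr (fun x => x) false
      = (PySem.List.sorted (PySem.Set.ofList arr) (fun x => x) false).flatMap
          (fun w => List.replicate (arr.count w) w) := by
  set ks := PySem.List.sorted (PySem.Set.ofList arr) (fun x => x) false with hks
  have hpw : ks.Pairwise (· < ·) := PySem.List.sorted_ofList_pairwise_lt arr
  have hnd : ks.Nodup := hpw.nodup
  have hmem : ∀ x, x ∈ ks ↔ x ∈ arr := by
    intro x
    rw [hks, PySem.List.mem_sorted, PySem.Set.mem_ofList]
  set G := ks.flatMap (fun w => List.replicate (arr.count w) w) with hG
  have hperm : G.Perm arr := by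
    rw [List.perm_iff_count]
    intro v
    rw [hG, count_flatMap_replicate arr ks hnd v]
    by_cases hv : v ∈ arr
    · simp [(hmem v).mpr hv]
    · have hnk : v ∉ ks := fun h => hv ((hmem v).mp h)
      simp [hnk, List.count_eq_zero_of_not_mem hv]
  have hple : G.Pairwise (· ≤ ·) := pairwise_flatMap_replicate arr ks hpw
  exact PySem.List.sorted_id_eq_of_perm_of_pairwise arr G hperm hple

-- ===== VERDICT (by name: the statement is the Claim_ definition above) =====
theorem maxNumberOfApples_spec : Claim_equal_maxNumberOfApples := by
  intro arr _
  unfold Spec_maxNumberOfApples maxNumberOfApples maxNumberOfApples_alt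
  simp only [PySem.Dict.foldl_insert_getD_add_one_eq_counter, PySem.Dict.keys_counter]
  rw [grouped_eq_sorted arr]
  rw [main_loop_eq (PySem.Dict.counter arr) arr _ 0 0
    (fun w _ => PySem.Dict.getD_counter arr w)]
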